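-- pv_equiv track=rewrite | github.com/blubber-rubber/AdventOfCode2025 | Day03/part2.py | rec
-- ===== SOURCE A (Python) =====
-- def rec(line, parts, needed=12):
--     if len(parts) == needed:
--         return True
--
--     if len(line) < needed - len(parts):
--         return False
--
--     for find in reversed(range(10)):
--         if str(find) in line:
--             i = line.index(str(find))
--             parts.append(str(find))
--             test = rec(line[i + 1:], parts, needed)
--             if test:
--                 return test
--             del parts[-1]
--         find -= 1
--
--     return False
-- ===== SOURCE B (Python) =====
-- def rec(line, parts, needed=12):
--     r = needed - len(parts)
--     if r < 0:
--         return False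
--     digits = [c for c in line if c.isdigit()]
--     if len(digits) < r:
--         return False
--     # greedy monotonic stack: lexicographically largest subsequence of length r
--     stack = []
--     drop = len(digits) - r
--     for c in digits:
--         while stack and drop > 0 and stack[-1] < c:
--             stack.pop()
--             drop -= 1
--         stack.append(c)
--     parts.extend(stack[:r])
--     return True
-- ===== Notes on version B (the rewrite author's own statement) =====
-- stated objective: alternative
-- what changed: A's recursive largest-digit-first backtracking (re-scanning the line with `in`/`index` at every level) is replaced by one digit-count check plus a single greedy monotonic-stack pass that selects the same lexicographically-largest digit subsequence.
import Mathlib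
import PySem

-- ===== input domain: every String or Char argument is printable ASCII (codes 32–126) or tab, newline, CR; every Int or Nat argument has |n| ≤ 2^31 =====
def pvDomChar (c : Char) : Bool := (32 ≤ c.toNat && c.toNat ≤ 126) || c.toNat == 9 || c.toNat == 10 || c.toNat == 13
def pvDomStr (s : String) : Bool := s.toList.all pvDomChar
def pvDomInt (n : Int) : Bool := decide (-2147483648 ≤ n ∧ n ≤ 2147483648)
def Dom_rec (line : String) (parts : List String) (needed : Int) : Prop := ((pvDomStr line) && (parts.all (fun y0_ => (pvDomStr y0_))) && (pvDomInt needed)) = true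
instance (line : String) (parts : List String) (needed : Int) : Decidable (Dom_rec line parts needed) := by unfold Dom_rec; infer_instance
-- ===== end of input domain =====

-- B replaces A's digit-by-digit backtracking search by a digit count plus a single greedy
-- monotonic-stack pass.  Both Pythons mutate `parts` identically (appending the chosen
-- digits on success); the theorems below are about the return value.

-- ===== PORT A =====
-- termination helpers for the port (cited by name in decreasing_by): str(d) is nonempty
theorem toStr_toList_ne_nil (d : Int) : (PySem.Int.toStr d).toList ≠ [] := by
  rw [PySem.Int.toList_toStr]
  unfold PySem.Int.toChars
  split_ifs <;> simp [Nat.toDigits]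
  simp only [Nat.toDigitsCore]
  split_ifs
  · simp
  · intro hcon
    have hl := Nat.toDigitsCore_lens_eq 10 d.toNat (d.toNat / 10) (Nat.digitChar (d.toNat % 10)) []
    rw [hcon] at hl
    simp at hl

-- A works on List Char (PySem.Chars = Python str semantics); `rec` wraps it on String.
-- `str(find) in line` → Chars.isIn; `line.index(str(find))` is guarded by the `in` test,
-- so it equals Chars.find (exact: Python's str.index = str.find when the substring is
-- present); `line[i+1:]` → PySem.List.slice.  `find -= 1` in A mutates the (re-assigned)
-- loop variable and has no effect; it is not ported.  A's in-place append/del on `parts`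
-- is threaded functionally as `parts ++ [str(find)]`.
mutual
  def recA (cs : List Char) (parts : List String) (needed : Int) : Bool :=
    if (parts.length : Int) = needed then true
    else if (cs.length : Int) < needed - (parts.length : Int) then false
    else recALoop cs parts needed ((PySem.List.pyRange 0 10 1).reverse)
  termination_by (cs.length, 11)
  decreasing_by
    exact Prod.Lex.right _ (by decide)

  -- `for find in reversed(range(10)): …` with its early `return test` on success
  def recALoop (cs : List Char) (parts : List String) (needed : Int) : List Int → Bool
    | [] => false
    | d :: rest =>
      if h : PySem.Chars.isIn (PySem.Int.toStr d).toList cs then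
        let test := recA (PySem.List.slice cs (some (PySem.Chars.find cs (PySem.Int.toStr d).toList + 1)) none) (parts ++ [PySem.Int.toStr d]) needed
        if test then test else recALoop cs parts needed rest
      else recALoop cs parts needed rest
  termination_by ds => (cs.length, ds.length)
  decreasing_by
    · -- recALoop → recA on line[i+1:]: the string gets strictly shorter
      apply Prod.Lex.left
      have hnn : 0 ≤ PySem.Chars.find cs (PySem.Int.toStr d).toList :=
        (PySem.Chars.find_nonneg_iff _ _).2 ((PySem.Chars.isIn_iff_infix _ _).1 h)
      obtain ⟨hpre, -⟩ := PySem.Chars.find_spec hnn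
      rcases hpre with ⟨t, ht⟩
      have hlt : (PySem.Chars.find cs (PySem.Int.toStr d).toList).toNat < cs.length := by
        have hlen := congrArg List.length ht
        simp only [List.length_append, List.length_drop] at hlen
        have hone : 1 ≤ (PySem.Int.toStr d).toList.length := by
          cases hterm : (PySem.Int.toStr d).toList with
          | nil => exact absurd hterm (toStr_toList_ne_nil d)
          | cons a b => simp
        omega
      rw [PySem.List.slice_some_none]
      have h1 : PySem.Chars.find cs (PySem.Int.toStr d).toList + 1
          = (((PySem.Chars.find cs (PySem.Int.toStr d).toList).toNat + 1 : Nat) : Int) := by omega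
      rw [h1, PySem.List.clampIdx_natCast]
      simp only [List.length_drop]
      omega
    · exact Prod.Lex.right _ (by simp)
    · exact Prod.Lex.right _ (by simp)
end

def rec (line : String) (parts : List String) (needed : Int) : Bool :=
  recA line.toList parts needed

-- ===== PORT B =====
-- `c.isdigit()` on a one-character string → PySem.Chars.strIsdigit [c].
-- The Python stack grows at its end (append/pop/[-1]); the port keeps the same stack with
-- its top at the head (the natural Lean storage), reversing once at the end for stack[:r].
-- `while stack and drop > 0 and stack[-1] < c: stack.pop(); drop -= 1` :
def recAltPop : List Char → Nat → Char → List Char × Nat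
  | t :: s, Nat.succ dr, c => if t < c then recAltPop s dr c else (t :: s, Nat.succ dr)
  | s, dr, _ => (s, dr)

def rec_alt (line : String) (parts : List String) (needed : Int) : Bool :=
  let r : Int := needed - (parts.length : Int)
  if r < 0 then false
  else
    let digits := line.toList.filter (fun c => PySem.Chars.strIsdigit [c])
    if (digits.length : Int) < r then false
    else
      -- greedy monotonic stack; in Python `parts.extend(stack[:r])` mutates parts —
      -- the returned Bool does not depend on the stack, so `_stack` is unused here
      let _stack :=
        (digits.foldl (fun (st : List Char × Nat) c =>
          let pr := recAltPop st.1 st.2 c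
          (c :: pr.1, pr.2)) ([], digits.length - r.toNat)).1.reverse.take r.toNat
      true

-- ===== PRECONDITION & SPEC =====
def Spec_rec (line : String) (parts : List String) (needed : Int) (out : Bool) : Prop := out = rec_alt line parts needed
instance (line : String) (parts : List String) (needed : Int) (out : Bool) : Decidable (Spec_rec line parts needed out) := by unfold Spec_rec; infer_instance

-- ===== CLAIM (what is proved, stated in full; the proofs are below) =====
def Claim_equal_rec : Prop := ∀ (line : String) (parts : List String) (needed : Int), Dom_rec line parts needed → Spec_rec line parts needed (rec line parts needed)

-- ===== LEMMAS AND PROOFS =====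

-- number of digit characters of cs
def dcnt (cs : List Char) : Nat := (cs.filter PySem.Chars.isdigit).length

theorem dcnt_le (cs : List Char) : dcnt cs ≤ cs.length :=
  List.length_filter_le _ _

theorem dcnt_split (cs : List Char) (n : Nat) :
    dcnt cs = dcnt (cs.take n) + dcnt (cs.drop n) := by
  unfold dcnt
  conv_lhs => rw [← List.take_append_drop n cs]
  rw [List.filter_append, List.length_append]

-- where a present single character is found, and what the slice after it is
theorem find_single (cs : List Char) (c : Char) (hin : PySem.Chars.isIn [c] cs = true) :
    (PySem.Chars.find cs [c]).toNat < cs.length ∧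
    PySem.List.slice cs (some (PySem.Chars.find cs [c] + 1)) none
      = cs.drop ((PySem.Chars.find cs [c]).toNat + 1) := by
  have hnn : 0 ≤ PySem.Chars.find cs [c] :=
    (PySem.Chars.find_nonneg_iff _ _).2 ((PySem.Chars.isIn_iff_infix _ _).1 hin)
  obtain ⟨hpre, -⟩ := PySem.Chars.find_spec hnn
  rcases hpre with ⟨t, ht⟩
  have hlt : (PySem.Chars.find cs [c]).toNat < cs.length := by
    have hlen := congrArg List.length ht
    simp only [List.length_append, List.length_cons, List.length_nil, List.length_drop] at hlen
    omega
  refine ⟨hlt, ?_⟩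
  rw [PySem.List.slice_some_none]
  congr 1
  have h1 : PySem.Chars.find cs [c] + 1
      = (((PySem.Chars.find cs [c]).toNat + 1 : Nat) : Int) := by omega
  rw [h1, PySem.List.clampIdx_natCast]
  omega

-- the loop succeeds iff some digit d present in cs leads to a successful recursion
theorem recALoop_iff (cs : List Char) (parts : List String) (needed : Int) (ds : List Int) :
    recALoop cs parts needed ds = true ↔
      ∃ d ∈ ds, PySem.Chars.isIn (PySem.Int.toStr d).toList cs = true ∧
        recA (PySem.List.slice cs (some (PySem.Chars.find cs (PySem.Int.toStr d).toList + 1)) none)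
             (parts ++ [PySem.Int.toStr d]) needed = true := by
  induction ds with
  | nil => simp [recALoop]
  | cons d rest ih =>
    rw [recALoop]
    by_cases h : PySem.Chars.isIn (PySem.Int.toStr d).toList cs = true
    · by_cases ht : recA (PySem.List.slice cs (some (PySem.Chars.find cs (PySem.Int.toStr d).toList + 1)) none) (parts ++ [PySem.Int.toStr d]) needed = true
      · simp only [h, dite_true, ht, if_true, true_iff]
        exact ⟨d, List.mem_cons_self, h, ht⟩
      · simp only [Bool.not_eq_true] at ht
        simp only [h, dite_true, ht, Bool.false_eq_true, if_false, ih, List.mem_cons]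
        constructor
        · rintro ⟨e, he, hrest⟩; exact ⟨e, Or.inr he, hrest⟩
        · rintro ⟨e, he, hine, hrest⟩
          rcases he with rfl | he
          · rw [ht] at hrest; exact absurd hrest (by simp)
          · exact ⟨e, he, hine, hrest⟩
    · simp only [Bool.not_eq_true] at h
      simp only [h, Bool.false_eq_true, dite_false, ih, List.mem_cons]
      constructor
      · rintro ⟨e, he, hrest⟩; exact ⟨e, Or.inr he, hrest⟩
      · rintro ⟨e, he, hine, hrest⟩
        rcases he with rfl | he
        · rw [h] at hine; exact absurd hine (by simp)
        · exact ⟨e, he, hine, hrest⟩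

-- forward: picking digit char c, cs has one more digit than the suffix after it
theorem dcnt_after_find (cs : List Char) (c : Char) (hdig : PySem.Chars.isdigit c = true)
    (hin : PySem.Chars.isIn [c] cs = true) :
    dcnt (cs.drop ((PySem.Chars.find cs [c]).toNat + 1)) + 1 ≤ dcnt cs := by
  have hnn : 0 ≤ PySem.Chars.find cs [c] :=
    (PySem.Chars.find_nonneg_iff _ _).2 ((PySem.Chars.isIn_iff_infix _ _).1 hin)
  obtain ⟨hpre, -⟩ := PySem.Chars.find_spec hnn
  set j := (PySem.Chars.find cs [c]).toNat with hj
  rcases hpre with ⟨t, ht⟩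
  have hdrop : cs.drop j = c :: t := by simpa using ht.symm
  have hjlt : j < cs.length := (find_single cs c hin).1
  have hdt : cs.drop (j + 1) = t := by
    have hcd := List.getElem_cons_drop hjlt (as := cs)
    rw [← hcd] at hdrop
    exact (List.cons.injEq _ _ _ _ ▸ hdrop).2
  have hsplit := dcnt_split cs j
  have hdj : dcnt (cs.drop j) = dcnt (cs.drop (j + 1)) + 1 := by
    rw [hdrop, hdt]
    unfold dcnt
    simp [hdig]
  omega

-- backward: the FIRST digit char c of cs satisfies: the suffix after find cs [c] has
-- exactly one digit fewer than cs
theorem first_digit_pick (cs : List Char) (hex : 1 ≤ dcnt cs) :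
    ∃ c, PySem.Chars.isdigit c = true ∧ PySem.Chars.isIn [c] cs = true ∧
      dcnt (cs.drop ((PySem.Chars.find cs [c]).toNat + 1)) + 1 = dcnt cs := by
  have hx : ∃ x ∈ cs, PySem.Chars.isdigit x = true := by
    unfold dcnt at hex
    have hlen0 : 0 < (cs.filter PySem.Chars.isdigit).length := by omega
    rcases List.length_pos_iff_exists_mem.1 hlen0 with ⟨x, hx⟩
    exact ⟨x, (List.mem_filter.1 hx).1, (List.mem_filter.1 hx).2⟩
  set j := cs.findIdx PySem.Chars.isdigit with hjdef
  have hjlt : j < cs.length := List.findIdx_lt_length.2 hx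
  set c := cs[j] with hcdef
  have hdig : PySem.Chars.isdigit c = true := List.findIdx_getElem
  have hdropj : cs.drop j = c :: cs.drop (j + 1) := (List.getElem_cons_drop hjlt).symm
  have hinf : [c] <:+: cs :=
    List.infix_iff_prefix_suffix.2 ⟨cs.drop j, ⟨cs.drop (j + 1), by simp [hdropj]⟩, List.drop_suffix _ _⟩
  have hin : PySem.Chars.isIn [c] cs = true := (PySem.Chars.isIn_iff_infix _ _).2 hinf
  have hnn : 0 ≤ PySem.Chars.find cs [c] := (PySem.Chars.find_nonneg_iff _ _).2 hinf
  obtain ⟨hpre, hmin⟩ := PySem.Chars.find_spec hnn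
  have hfind : (PySem.Chars.find cs [c]).toNat = j := by
    set f := (PySem.Chars.find cs [c]).toNat with hfdef
    rcases Nat.lt_trichotomy f j with hfj | hfj | hfj
    · -- c would occur strictly before the first digit: impossible
      exfalso
      rcases hpre with ⟨t, ht⟩
      have hflt : f < cs.length := by omega
      have hdropf : cs.drop f = c :: t := by simpa using ht.symm
      have hcf : cs[f] = c := by
        have h2 := List.getElem_cons_drop hflt (as := cs)
        rw [← h2] at hdropf
        exact (List.cons.injEq _ _ _ _ ▸ hdropf).1
      have hnd : PySem.Chars.isdigit cs[f] = false := List.not_of_lt_findIdx hfj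
      rw [hcf, hdig] at hnd
      exact Bool.noConfusion hnd
    · exact hfj
    · exact absurd ⟨cs.drop (j + 1), hdropj.symm⟩ (hmin j hfj)
  refine ⟨c, hdig, hin, ?_⟩
  rw [hfind]
  have htake : dcnt (cs.take j) = 0 := by
    unfold dcnt
    rw [List.length_eq_zero_iff, List.filter_eq_nil_iff]
    intro a ha
    rw [List.mem_take_iff_getElem] at ha
    obtain ⟨i, hi, rfl⟩ := ha
    have hij : i < j := by simp at hi; omega
    have hnd := List.not_of_lt_findIdx (p := PySem.Chars.isdigit) (xs := cs) hij
    simpa [List.getElem_take] using hnd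
  have hsplit := dcnt_split cs j
  have hdj : dcnt (cs.drop j) = dcnt (cs.drop (j + 1)) + 1 := by
    rw [hdropj]
    unfold dcnt
    simp [hdig]
  omega

-- each candidate d of the loop has str(d) a single digit character, and conversely each
-- digit character is str(d) for some candidate d
theorem candidate_char (d : Int) (hd : d ∈ (PySem.List.pyRange 0 10 1).reverse) :
    ∃ c, (PySem.Int.toStr d).toList = [c] ∧ PySem.Chars.isdigit c = true := by
  have hds : (PySem.List.pyRange 0 10 1).reverse = [9, 8, 7, 6, 5, 4, 3, 2, 1, 0] := by decide
  rw [hds] at hd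
  simp only [List.mem_cons, List.not_mem_nil, or_false] at hd
  rcases hd with rfl | rfl | rfl | rfl | rfl | rfl | rfl | rfl | rfl | rfl
  · exact ⟨'9', by decide, by decide⟩
  · exact ⟨'8', by decide, by decide⟩
  · exact ⟨'7', by decide, by decide⟩
  · exact ⟨'6', by decide, by decide⟩
  · exact ⟨'5', by decide, by decide⟩
  · exact ⟨'4', by decide, by decide⟩
  · exact ⟨'3', by decide, by decide⟩
  · exact ⟨'2', by decide, by decide⟩
  · exact ⟨'1', by decide, by decide⟩
  · exact ⟨'0', by decide, by decide⟩

theorem digit_char_cases (c : Char) (h : PySem.Chars.isdigit c = true) :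
    ∃ d : Int, d ∈ (PySem.List.pyRange 0 10 1).reverse ∧ (PySem.Int.toStr d).toList = [c] := by
  have hc : 48 ≤ c.toNat ∧ c.toNat ≤ 57 := by
    unfold PySem.Chars.isdigit at h
    simp only [Bool.and_eq_true, decide_eq_true_eq] at h
    exact ⟨h.1, h.2⟩
  have hnat : c.toNat - 48 < 10 := by omega
  set k := c.toNat - 48 with hkdef
  have he : c.toNat = 48 + k := by omega
  have hck : c = Char.ofNat (48 + k) := by
    apply Char.ext
    apply UInt32.toNat_inj.mp
    have hval : (Char.ofNat (48 + k)).toNat = 48 + k := by interval_cases k <;> decide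
    exact he.trans hval.symm
  refine ⟨(k : Int), ?_, ?_⟩
  · interval_cases k <;> decide
  · rw [hck]
    interval_cases k <;> decide

-- the key characterisation of A: success iff parts can be completed, i.e. iff cs still
-- carries at least needed - len(parts) (≥ 0) digit characters
theorem recA_eq (n : Nat) : ∀ (cs : List Char), cs.length < n → ∀ (parts : List String) (needed : Int),
    recA cs parts needed =
      decide ((parts.length : Int) ≤ needed ∧ needed ≤ (parts.length : Int) + (dcnt cs : Int)) := by
  induction n with
  | zero => intro cs h; omega
  | succ n ih =>
    intro cs hlen parts needed
    rw [recA]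
    split_ifs with h1 h2
    · symm
      rw [decide_eq_true_iff]
      have h0 : (0:Int) ≤ (dcnt cs : Int) := Int.natCast_nonneg _
      omega
    · symm
      rw [decide_eq_false_iff_not]
      have hd := dcnt_le cs
      rintro ⟨ha, hb⟩
      omega
    · rw [Bool.eq_iff_iff, recALoop_iff, decide_eq_true_iff]
      constructor
      · rintro ⟨d, hdmem, hin, hrec⟩
        obtain ⟨c, hsubc, hcd⟩ := candidate_char d hdmem
        rw [hsubc] at hin hrec
        obtain ⟨hjlt, hslice⟩ := find_single cs c hin
        rw [hslice, ih _ (by simp only [List.length_drop]; omega) _ _, decide_eq_true_iff] at hrec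
        simp only [List.length_append, List.length_cons, List.length_nil] at hrec
        push_cast at hrec
        have hcount := dcnt_after_find cs c hcd hin
        omega
      · rintro ⟨ha, hb⟩
        have hlt : (parts.length : Int) < needed := lt_of_le_of_ne ha h1
        have hd1 : 1 ≤ dcnt cs := by unfold dcnt at hb ⊢; omega
        obtain ⟨c, hdig, hin, hcnt⟩ := first_digit_pick cs hd1
        obtain ⟨d, hdmem, hdstr⟩ := digit_char_cases c hdig
        refine ⟨d, hdmem, by rw [hdstr]; exact hin, ?_⟩
        rw [hdstr]
        obtain ⟨hjlt, hslice⟩ := find_single cs c hin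
        rw [hslice, ih _ (by simp only [List.length_drop]; omega) _ _, decide_eq_true_iff]
        simp only [List.length_append, List.length_cons, List.length_nil]
        push_cast
        omega

-- B's Bool unfolded: the same count condition
theorem rec_alt_eq (line : String) (parts : List String) (needed : Int) :
    rec_alt line parts needed =
      decide ((parts.length : Int) ≤ needed ∧ needed ≤ (parts.length : Int) + (dcnt line.toList : Int)) := by
  unfold rec_alt
  have hfil : line.toList.filter (fun c => PySem.Chars.strIsdigit [c])
      = line.toList.filter PySem.Chars.isdigit := by
    apply List.filter_congr
    intro c _
    simp [PySem.Chars.strIsdigit]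
  simp only [hfil]
  split_ifs with h1 h2
  · symm
    rw [decide_eq_false_iff_not]
    rintro ⟨ha, hb⟩
    omega
  · symm
    rw [decide_eq_false_iff_not]
    rintro ⟨ha, hb⟩
    unfold dcnt at hb
    omega
  · symm
    rw [decide_eq_true_iff]
    unfold dcnt
    constructor <;> omega

-- ===== VERDICT (by name: the statement is the Claim_ definition above) =====
theorem rec_spec : Claim_equal_rec := by
  intro line parts needed _
  unfold Spec_rec rec
  rw [recA_eq (line.toList.length + 1) _ (by omega), rec_alt_eq]
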